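-- pv_equiv track=rewrite | github.com/r-parvulescu/ro_judicial_professions | describe/mobility/sequences.py | count_between_moves_in_time_interval
-- ===== SOURCE A (Python) =====
-- def count_between_moves_in_time_interval(geog_lvl_moves_seq):
--     """
--     Report number of geographic moves for sequences of geographic moves - hierarchical levels of different lengths.
--      - for sequences 4-6 years/element long, report if there is at least one move
--      - for sequences 9-11 years/elements long, report if there are at least two moves
--      - for sequences 13-15 years/elements long, report if there are at least three moves
--
--      If the sequence we analyse is "not long enough", report "NLE" instead.
--
--      NB: I realise I'm duplicating loops from get_geog_lvl_moves() but I want the code to be clear.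
--
--     :param geog_lvl_moves_seq:
--     :return: return a 3-tuple
--     """
--
--     split_seq = geog_lvl_moves_seq.split('-')
--     num_years = len(split_seq)
--
--     moves_in_span = {"first 6 years": [], "first 11 years": [], "first 15 years": []}
--
--     if 15 <= num_years:
--         [moves_in_span["first 15 years"].append(1) for idx, elem in enumerate(split_seq) if "MB" in elem and idx < 15]
--         [moves_in_span["first 11 years"].append(1) for idx, elem in enumerate(split_seq) if "MB" in elem and idx < 11]
--         [moves_in_span["first 6 years"].append(1) for idx, elem in enumerate(split_seq) if "MB" in elem and idx < 6]
--
--     elif 11 <= num_years < 15: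
--         moves_in_span["first 15 years"] = ''
--         [moves_in_span["first 11 years"].append(1) for idx, elem in enumerate(split_seq) if "MB" in elem and idx < 11]
--         [moves_in_span["first 6 years"].append(1) for idx, elem in enumerate(split_seq) if "MB" in elem and idx < 6]
--
--     elif 6 <= num_years < 11:
--         moves_in_span["first 15 years"] = ''
--         moves_in_span["first 11 years"] = ''
--         [moves_in_span["first 6 years"].append(1) for idx, elem in enumerate(split_seq) if "MB" in elem and idx < 6]
--
--     # get the sums of moves per time interval/span
--     for span, moves in moves_in_span.items():
--         if type(moves) == list:
--             moves_in_span[span] = str(sum(moves))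
--
--     return moves_in_span
-- ===== SOURCE B (Python) =====
-- def count_between_moves_in_time_interval(geog_lvl_moves_seq):
--     split_seq = geog_lvl_moves_seq.split('-')
--     num_years = len(split_seq)
--
--     if num_years < 6:
--         # sequence not long enough for any span: every span reports zero moves
--         return {"first 6 years": "0", "first 11 years": "0", "first 15 years": "0"}
--
--     c6 = c11 = c15 = 0
--     for idx, elem in enumerate(split_seq):
--         if "MB" in elem:
--             if idx < 6:
--                 c6 += 1
--             if idx < 11:
--                 c11 += 1
--             if idx < 15:
--                 c15 += 1
--
--     return {"first 6 years": str(c6),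
--             "first 11 years": str(c11) if num_years >= 11 else '',
--             "first 15 years": str(c15) if num_years >= 15 else ''}
-- ===== Notes on version B (the rewrite author's own statement) =====
-- stated objective: simpler
-- what changed: One counting pass over the sequence with three counters and direct assembly of the result dict, replacing three side-effecting list comprehensions appending into dict-held lists plus a final sum-and-stringify conversion loop.
import Mathlib
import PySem

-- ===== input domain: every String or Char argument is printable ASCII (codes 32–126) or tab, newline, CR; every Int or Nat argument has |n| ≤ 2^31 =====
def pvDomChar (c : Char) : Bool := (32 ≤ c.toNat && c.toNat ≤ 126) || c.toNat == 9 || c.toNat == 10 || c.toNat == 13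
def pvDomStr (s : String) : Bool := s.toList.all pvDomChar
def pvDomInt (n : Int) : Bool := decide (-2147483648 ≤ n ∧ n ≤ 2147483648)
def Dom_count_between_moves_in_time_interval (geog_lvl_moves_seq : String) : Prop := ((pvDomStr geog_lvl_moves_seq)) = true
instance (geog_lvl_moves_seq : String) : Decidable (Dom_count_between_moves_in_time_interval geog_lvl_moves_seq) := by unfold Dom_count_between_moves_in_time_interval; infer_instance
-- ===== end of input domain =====

-- B replaces A's three side-effecting list comprehensions appending into dict-held lists (plus a
-- final sum-and-stringify loop) by one counting pass with three counters and direct assembly of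
-- the result dict (objective: simpler; same asymptotic cost).

-- ===== PORT A =====
-- dict values in A are heterogeneous: a list of 1s, later replaced by a string (or set to '')
inductive MVal : Type
  | lst : List Int → MVal
  | str : String → MVal
deriving DecidableEq, Repr

-- one comprehension `[d[key].append(1) for idx, elem in enumerate(split_seq) if "MB" in elem and idx < bound]`
-- (d[key].append(1) reads the current value, which is always a list where A runs this; the .str
-- branch of the match is unreachable and left as the identity)
def cbAppendLoop (d : PySem.Dict String MVal) (key : String) (split_seq : List String)
    (bound : Int) : PySem.Dict String MVal :=
  (PySem.List.enumerate split_seq).foldl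
    (fun d p =>
      if PySem.Str.isIn "MB" p.2 && decide (p.1 < bound) then
        d.modify key (MVal.lst []) (fun v => match v with
          | MVal.lst l => MVal.lst (l ++ [1])
          | MVal.str _ => v)
      else d) d

def count_between_moves_in_time_interval (geog_lvl_moves_seq : String) : List (String × String) :=
  -- s.split('-'): sep "-" is nonempty, so split? is always `some`
  let split_seq : List String := (PySem.Str.split? geog_lvl_moves_seq "-").getD []
  let num_years : Int := split_seq.length
  let d0 : PySem.Dict String MVal :=
    PySem.Dict.mk [("first 6 years", MVal.lst []), ("first 11 years", MVal.lst []),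
                   ("first 15 years", MVal.lst [])]
  let d :=
    if 15 ≤ num_years then
      cbAppendLoop (cbAppendLoop (cbAppendLoop d0 "first 15 years" split_seq 15)
        "first 11 years" split_seq 11) "first 6 years" split_seq 6
    else if 11 ≤ num_years ∧ num_years < 15 then
      let d1 := d0.insert "first 15 years" (MVal.str "")
      cbAppendLoop (cbAppendLoop d1 "first 11 years" split_seq 11) "first 6 years" split_seq 6
    else if 6 ≤ num_years ∧ num_years < 11 then
      let d1 := (d0.insert "first 15 years" (MVal.str "")).insert "first 11 years" (MVal.str "")
      cbAppendLoop d1 "first 6 years" split_seq 6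
    else d0
  -- for span, moves in moves_in_span.items(): if type(moves) == list: moves_in_span[span] = str(sum(moves))
  let d2 := d.items.foldl
    (fun dd p => match p.2 with
      | MVal.lst l => dd.insert p.1 (MVal.str (PySem.Int.toStr l.sum))
      | MVal.str _ => dd) d
  -- the returned dict holds only strings at this point; the .lst case is unreachable
  d2.items.map (fun p => (p.1, match p.2 with
    | MVal.lst _ => ""
    | MVal.str t => t))

-- ===== PORT B =====
def count_between_moves_in_time_interval_alt (geog_lvl_moves_seq : String) : List (String × String) :=
  let split_seq : List String := (PySem.Str.split? geog_lvl_moves_seq "-").getD []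
  let num_years : Int := split_seq.length
  if num_years < 6 then
    [("first 6 years", "0"), ("first 11 years", "0"), ("first 15 years", "0")]
  else
    let c := (PySem.List.enumerate split_seq).foldl
      (fun (c : Int × Int × Int) p =>
        if PySem.Str.isIn "MB" p.2 then
          (c.1 + (if p.1 < 6 then 1 else 0),
           c.2.1 + (if p.1 < 11 then 1 else 0),
           c.2.2 + (if p.1 < 15 then 1 else 0))
        else c) (0, 0, 0)
    [("first 6 years", PySem.Int.toStr c.1),
     ("first 11 years", if 11 ≤ num_years then PySem.Int.toStr c.2.1 else ""),
     ("first 15 years", if 15 ≤ num_years then PySem.Int.toStr c.2.2 else "")]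

-- ===== PRECONDITION & SPEC =====
def Spec_count_between_moves_in_time_interval (geog_lvl_moves_seq : String) (out : List (String × String)) : Prop := out = count_between_moves_in_time_interval_alt geog_lvl_moves_seq
instance (geog_lvl_moves_seq : String) (out : List (String × String)) : Decidable (Spec_count_between_moves_in_time_interval geog_lvl_moves_seq out) := by unfold Spec_count_between_moves_in_time_interval; infer_instance

-- ===== CLAIM (what is proved, stated in full; the proofs are below) =====
def Claim_equal_count_between_moves_in_time_interval : Prop := ∀ (geog_lvl_moves_seq : String), Dom_count_between_moves_in_time_interval geog_lvl_moves_seq → Spec_count_between_moves_in_time_interval geog_lvl_moves_seq (count_between_moves_in_time_interval geog_lvl_moves_seq)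

-- ===== LEMMAS AND PROOFS =====

-- number of qualifying (idx, elem) pairs for a given bound
def cntB (E : List (Int × String)) (bound : Int) : Nat :=
  E.countP (fun p => PySem.Str.isIn "MB" p.2 && decide (p.1 < bound))

theorem loopA_at6 (E : List (Int × String)) (bound : Int) (l : List Int) (v11 v15 : MVal) :
    E.foldl (fun d p =>
      if PySem.Str.isIn "MB" p.2 && decide (p.1 < bound) then
        d.modify "first 6 years" (MVal.lst []) (fun v => match v with
          | MVal.lst l => MVal.lst (l ++ [1]) | MVal.str _ => v)
      else d)
      (PySem.Dict.mk [("first 6 years", MVal.lst l), ("first 11 years", v11), ("first 15 years", v15)])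
    = PySem.Dict.mk [("first 6 years", MVal.lst (l ++ List.replicate (cntB E bound) 1)),
        ("first 11 years", v11), ("first 15 years", v15)] := by
  induction E generalizing l with
  | nil => simp [cntB]
  | cons p E ih =>
    by_cases h : (PySem.Str.isIn "MB" p.2 && decide (p.1 < bound)) = true
    · simp only [List.foldl_cons, h, if_pos]
      rw [show (PySem.Dict.mk [("first 6 years", MVal.lst l), ("first 11 years", v11), ("first 15 years", v15)]).modify
        "first 6 years" (MVal.lst []) (fun v => match v with
          | MVal.lst l => MVal.lst (l ++ [1]) | MVal.str _ => v)
        = PySem.Dict.mk [("first 6 years", MVal.lst (l ++ [1])), ("first 11 years", v11), ("first 15 years", v15)] from by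
          simp [PySem.Dict.modify, PySem.Dict.insert, PySem.Dict.getD, PySem.Dict.get?, PySem.Dict.contains]]
      rw [ih]
      unfold cntB
      simp only [List.countP_cons, h]
      simp [List.replicate_succ]
    · simp only [List.foldl_cons, h, if_neg, Bool.false_eq_true, not_false_iff]
      rw [ih]
      unfold cntB
      simp only [List.countP_cons]
      rw [if_neg h]
      simp

theorem loopA_at11 (E : List (Int × String)) (bound : Int) (l : List Int) (v6 v15 : MVal) :
    E.foldl (fun d p =>
      if PySem.Str.isIn "MB" p.2 && decide (p.1 < bound) then
        d.modify "first 11 years" (MVal.lst []) (fun v => match v with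
          | MVal.lst l => MVal.lst (l ++ [1]) | MVal.str _ => v)
      else d)
      (PySem.Dict.mk [("first 6 years", v6), ("first 11 years", MVal.lst l), ("first 15 years", v15)])
    = PySem.Dict.mk [("first 6 years", v6),
        ("first 11 years", MVal.lst (l ++ List.replicate (cntB E bound) 1)), ("first 15 years", v15)] := by
  induction E generalizing l with
  | nil => simp [cntB]
  | cons p E ih =>
    by_cases h : (PySem.Str.isIn "MB" p.2 && decide (p.1 < bound)) = true
    · simp only [List.foldl_cons, h, if_pos]
      rw [show (PySem.Dict.mk [("first 6 years", v6), ("first 11 years", MVal.lst l), ("first 15 years", v15)]).modify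
        "first 11 years" (MVal.lst []) (fun v => match v with
          | MVal.lst l => MVal.lst (l ++ [1]) | MVal.str _ => v)
        = PySem.Dict.mk [("first 6 years", v6), ("first 11 years", MVal.lst (l ++ [1])), ("first 15 years", v15)] from by
          simp [PySem.Dict.modify, PySem.Dict.insert, PySem.Dict.getD, PySem.Dict.get?, PySem.Dict.contains]]
      rw [ih]
      unfold cntB
      simp only [List.countP_cons, h]
      simp [List.replicate_succ]
    · simp only [List.foldl_cons, h, if_neg, Bool.false_eq_true, not_false_iff]
      rw [ih]
      unfold cntB
      simp only [List.countP_cons]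
      rw [if_neg h]
      simp

theorem loopA_at15 (E : List (Int × String)) (bound : Int) (l : List Int) (v6 v11 : MVal) :
    E.foldl (fun d p =>
      if PySem.Str.isIn "MB" p.2 && decide (p.1 < bound) then
        d.modify "first 15 years" (MVal.lst []) (fun v => match v with
          | MVal.lst l => MVal.lst (l ++ [1]) | MVal.str _ => v)
      else d)
      (PySem.Dict.mk [("first 6 years", v6), ("first 11 years", v11), ("first 15 years", MVal.lst l)])
    = PySem.Dict.mk [("first 6 years", v6), ("first 11 years", v11),
        ("first 15 years", MVal.lst (l ++ List.replicate (cntB E bound) 1))] := by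
  induction E generalizing l with
  | nil => simp [cntB]
  | cons p E ih =>
    by_cases h : (PySem.Str.isIn "MB" p.2 && decide (p.1 < bound)) = true
    · simp only [List.foldl_cons, h, if_pos]
      rw [show (PySem.Dict.mk [("first 6 years", v6), ("first 11 years", v11), ("first 15 years", MVal.lst l)]).modify
        "first 15 years" (MVal.lst []) (fun v => match v with
          | MVal.lst l => MVal.lst (l ++ [1]) | MVal.str _ => v)
        = PySem.Dict.mk [("first 6 years", v6), ("first 11 years", v11), ("first 15 years", MVal.lst (l ++ [1]))] from by
          simp [PySem.Dict.modify, PySem.Dict.insert, PySem.Dict.getD, PySem.Dict.get?, PySem.Dict.contains]]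
      rw [ih]
      unfold cntB
      simp only [List.countP_cons, h]
      simp [List.replicate_succ]
    · simp only [List.foldl_cons, h, if_neg, Bool.false_eq_true, not_false_iff]
      rw [ih]
      unfold cntB
      simp only [List.countP_cons]
      rw [if_neg h]
      simp

theorem loopB_counts (E : List (Int × String)) (a b c : Int) :
    E.foldl (fun (c : Int × Int × Int) p =>
        if PySem.Str.isIn "MB" p.2 then
          (c.1 + (if p.1 < 6 then 1 else 0),
           c.2.1 + (if p.1 < 11 then 1 else 0),
           c.2.2 + (if p.1 < 15 then 1 else 0))
        else c) (a, b, c)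
    = (a + (cntB E 6 : Int), b + (cntB E 11 : Int), c + (cntB E 15 : Int)) := by
  induction E generalizing a b c with
  | nil => simp [cntB]
  | cons p E ih =>
    simp only [List.foldl_cons]
    by_cases hm : PySem.Str.isIn "MB" p.2 = true
    · simp only [hm, if_pos]
      rw [ih]
      simp only [cntB, List.countP_cons, hm, Bool.true_and]
      by_cases h6 : p.1 < 6 <;> by_cases h11 : p.1 < 11 <;> by_cases h15 : p.1 < 15 <;>
        simp [h6, h11, h15] <;> omega
    · have hf : PySem.Str.isIn "MB" p.2 = false := by
        revert hm; cases PySem.Str.isIn "MB" p.2 <;> simp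
      simp only [hf, Bool.false_eq_true, if_neg, not_false_iff]
      rw [ih]
      unfold cntB
      simp only [List.countP_cons, hf, Bool.false_and]
      simp

theorem count_between_moves_in_time_interval_spec : Claim_equal_count_between_moves_in_time_interval := by
  intro s _
  unfold Spec_count_between_moves_in_time_interval
  unfold count_between_moves_in_time_interval count_between_moves_in_time_interval_alt
  set seq : List String := (PySem.Str.split? s "-").getD [] with hseq
  simp only []
  set n : Int := (seq.length : Int) with hn
  by_cases h15 : 15 ≤ n
  · have h6 : ¬ n < 6 := by omega
    simp only [h15, if_pos, h6, if_neg, not_false_iff]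
    unfold cbAppendLoop
    rw [loopA_at15, loopA_at11, loopA_at6, loopB_counts]
    simp [show (11:Int) ≤ n by omega, PySem.Dict.insert, PySem.Dict.contains]
  · by_cases h11 : 11 ≤ n
    · have h6 : ¬ n < 6 := by omega
      have hc : 11 ≤ n ∧ n < 15 := ⟨h11, by omega⟩
      simp only [h15, if_neg, hc, if_pos, h6, not_false_iff]
      unfold cbAppendLoop
      have hins : (PySem.Dict.mk [("first 6 years", MVal.lst []), ("first 11 years", MVal.lst []),
          ("first 15 years", MVal.lst [])]).insert "first 15 years" (MVal.str "")
          = PySem.Dict.mk [("first 6 years", MVal.lst []), ("first 11 years", MVal.lst []),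
            ("first 15 years", MVal.str "")] := by decide
      rw [hins, loopA_at11, loopA_at6, loopB_counts]
      simp [PySem.Dict.insert, PySem.Dict.contains]
    · by_cases h6 : 6 ≤ n
      · have hc : ¬ (11 ≤ n ∧ n < 15) := by omega
        have hc2 : 6 ≤ n ∧ n < 11 := ⟨h6, by omega⟩
        have h6' : ¬ n < 6 := by omega
        simp only [h15, if_neg, hc, hc2, h6', not_false_iff]
        have hins : ((PySem.Dict.mk [("first 6 years", MVal.lst []), ("first 11 years", MVal.lst []),
            ("first 15 years", MVal.lst [])]).insert "first 15 years" (MVal.str "")).insert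
            "first 11 years" (MVal.str "")
            = PySem.Dict.mk [("first 6 years", MVal.lst []), ("first 11 years", MVal.str ""),
              ("first 15 years", MVal.str "")] := by decide
        unfold cbAppendLoop
        rw [hins, loopA_at6, loopB_counts]
        simp [show ¬ (11:Int) ≤ n by omega, PySem.Dict.insert, PySem.Dict.contains]
      · have hlt : n < 6 := by omega
        have hc : ¬ (11 ≤ n ∧ n < 15) := by omega
        have hc2 : ¬ (6 ≤ n ∧ n < 11) := by omega
        simp only [h15, hc, hc2, if_neg, not_false_iff, hlt, if_pos]
        decide
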